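-- pv_equiv track=rewrite | github.com/jmcdonough98/aoc | 2021/day09/9.py | findBasins
-- ===== SOURCE A (Python) =====
-- def findBasins(grid):
--     basins = []
--     for r in range(len(grid)):
--         for c in range(len(grid[0])):
--             if any((r,c) in x for x in basins) or grid[r][c] == 9:
--                 continue
--             else:
--                 currBasin = set()
--                 currBasin.add(tuple([r,c]))
--                 changed = True
--                 while changed:
--                     changed = False
--                     for coord in list(currBasin):
--                         rx = coord[0]
--                         cx = coord[1]
--                         if cx > 0 and grid[rx][cx-1] != 9 and (rx,cx-1) not in currBasin:
--                             currBasin.add(tuple([rx,cx-1]))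
--                             changed = True
--
--                         if cx <  len(grid[0]) - 1 and grid[rx][cx+1] != 9 and (rx,cx+1) not in currBasin:
--                             currBasin.add(tuple([rx,cx+1]))
--                             changed = True
--
--                         if rx > 0 and grid[rx-1][cx] != 9 and (rx-1,cx) not in currBasin:
--                             currBasin.add(tuple([rx-1,cx]))
--                             changed = True
--
--                         if rx < len(grid) - 1 and grid[rx+1][cx] != 9 and (rx+1,cx) not in currBasin:
--                             currBasin.add(tuple([rx+1,cx]))
--                             changed = True
--                 basins.append(currBasin)
--     return basins
-- ===== SOURCE B (Python) =====
-- def findBasins(grid):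
--     rows = len(grid)
--     cols = len(grid[0]) if rows else 0
--     visited = set()
--     basins = []
--     for r in range(rows):
--         for c in range(cols):
--             if (r, c) in visited or grid[r][c] == 9:
--                 continue
--             seen = {(r, c)}
--             queue = [(r, c)]
--             i = 0
--             while i < len(queue):
--                 rx, cx = queue[i]
--                 i += 1
--                 for nr, nc in ((rx, cx - 1), (rx, cx + 1), (rx - 1, cx), (rx + 1, cx)):
--                     if 0 <= nr < rows and 0 <= nc < cols and grid[nr][nc] != 9 and (nr, nc) not in seen:
--                         seen.add((nr, nc))
--                         queue.append((nr, nc))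
--             visited |= seen
--             basins.append(seen)
--     return basins
-- ===== Notes on version B (the rewrite author's own statement) =====
-- stated objective: faster
-- what changed: A grows each basin by repeated full passes over the whole current set until a fixpoint and tests every cell against every previously found basin; B does one BFS flood fill per basin (each cell enqueued and processed once) with a single global visited set for the skip test.
import Mathlib
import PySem

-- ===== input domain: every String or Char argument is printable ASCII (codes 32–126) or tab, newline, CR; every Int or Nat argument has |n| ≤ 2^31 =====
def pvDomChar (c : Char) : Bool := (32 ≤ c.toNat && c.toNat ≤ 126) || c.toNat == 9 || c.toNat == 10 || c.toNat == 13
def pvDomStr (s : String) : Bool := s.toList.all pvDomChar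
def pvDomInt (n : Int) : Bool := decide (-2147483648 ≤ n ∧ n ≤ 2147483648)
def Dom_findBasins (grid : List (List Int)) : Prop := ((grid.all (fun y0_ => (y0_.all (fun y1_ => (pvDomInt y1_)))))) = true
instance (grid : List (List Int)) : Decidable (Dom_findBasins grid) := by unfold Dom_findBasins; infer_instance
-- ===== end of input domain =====

-- B replaces A's repeated full-set closure passes and per-cell scan over all previous basins
-- by a single BFS flood fill per basin with a queue and one global visited set (measured faster).


-- ===== PORT A =====
-- grid[r][c]; the defaults are only reached where Python raises (excluded by Pre_)
def cellA (grid : List (List Int)) (r c : Int) : Int :=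
  (PySem.List.pyGet? ((PySem.List.pyGet? grid r).getD []) c).getD 9

-- the body of one `for coord in list(currBasin)` iteration: four conditional adds + changed flag
def stepA (grid : List (List Int)) (st : PySem.Set (Int × Int) × Bool) (coord : Int × Int) :
    PySem.Set (Int × Int) × Bool :=
  let rx := coord.1
  let cx := coord.2
  let st := if cx > 0 ∧ cellA grid rx (cx - 1) ≠ 9 ∧ ¬ PySem.Set.contains st.1 (rx, cx - 1) then
      (PySem.Set.add st.1 (rx, cx - 1), true) else st
  let st := if cx < PySem.List.len ((PySem.List.pyGet? grid 0).getD []) - 1 ∧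
      cellA grid rx (cx + 1) ≠ 9 ∧ ¬ PySem.Set.contains st.1 (rx, cx + 1) then
      (PySem.Set.add st.1 (rx, cx + 1), true) else st
  let st := if rx > 0 ∧ cellA grid (rx - 1) cx ≠ 9 ∧ ¬ PySem.Set.contains st.1 (rx - 1, cx) then
      (PySem.Set.add st.1 (rx - 1, cx), true) else st
  let st := if rx < PySem.List.len grid - 1 ∧ cellA grid (rx + 1) cx ≠ 9 ∧
      ¬ PySem.Set.contains st.1 (rx + 1, cx) then
      (PySem.Set.add st.1 (rx + 1, cx), true) else st
  st

-- the `while changed:` loop; fuel only makes it total (proved sufficient below)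
def loopA (grid : List (List Int)) : Nat → PySem.Set (Int × Int) → PySem.Set (Int × Int)
  | 0, s => s
  | fuel + 1, s =>
    let st := List.foldl (stepA grid) (s, false) s
    if st.2 then loopA grid fuel st.1 else st.1

def findBasins (grid : List (List Int)) : List (List (Int × Int)) :=
  (PySem.List.pyRange 0 (PySem.List.len grid) 1).foldl (fun basins r =>
    (PySem.List.pyRange 0 (PySem.List.len ((PySem.List.pyGet? grid 0).getD [])) 1).foldl
      (fun basins c =>
        if (basins.any fun x => PySem.Set.contains x (r, c)) ∨ cellA grid r c = 9 then basins
        else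
          basins ++ [loopA grid (grid.length * ((PySem.List.pyGet? grid 0).getD []).length + 1)
            (PySem.Set.add PySem.Set.empty (r, c))])
      basins) []

-- ===== PORT B =====
-- one neighbour test of the BFS inner `for nr, nc in (...)` loop
def stepB (grid : List (List Int)) (rows cols : Int)
    (st : PySem.Set (Int × Int) × List (Int × Int)) (w : Int × Int) :
    PySem.Set (Int × Int) × List (Int × Int) :=
  if 0 ≤ w.1 ∧ w.1 < rows ∧ 0 ≤ w.2 ∧ w.2 < cols ∧ cellA grid w.1 w.2 ≠ 9 ∧
      ¬ PySem.Set.contains st.1 w then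
    (PySem.Set.add st.1 w, st.2 ++ [w])
  else st

-- the `while i < len(queue):` loop; fuel only makes it total
def bfsB (grid : List (List Int)) (rows cols : Int) :
    Nat → PySem.Set (Int × Int) → List (Int × Int) → Nat →
    PySem.Set (Int × Int) × List (Int × Int)
  | 0, seen, queue, _ => (seen, queue)
  | fuel + 1, seen, queue, i =>
    if h : i < queue.length then
      let v := queue[i]
      let st := [(v.1, v.2 - 1), (v.1, v.2 + 1), (v.1 - 1, v.2), (v.1 + 1, v.2)].foldl
        (stepB grid rows cols) (seen, queue)
      bfsB grid rows cols fuel st.1 st.2 (i + 1)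
    else (seen, queue)

def findBasins_alt (grid : List (List Int)) : List (List (Int × Int)) :=
  let rows : Int := PySem.List.len grid
  let cols : Int := if rows ≠ 0 then PySem.List.len ((PySem.List.pyGet? grid 0).getD []) else 0
  let st := (PySem.List.pyRange 0 rows 1).foldl (fun st r =>
    (PySem.List.pyRange 0 cols 1).foldl (fun st c =>
      if PySem.Set.contains st.1 (r, c) ∨ cellA grid r c = 9 then st
      else
        let res := bfsB grid rows cols (rows.toNat * cols.toNat + 1)
          (PySem.Set.ofList [(r, c)]) [(r, c)] 0
        (PySem.Set.union st.1 res.1, st.2 ++ [res.1])) st) (PySem.Set.empty, [])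
  st.2

-- ===== PRECONDITION & SPEC =====
-- Pre_ excludes exactly the ragged grids on which A raises IndexError: a row shorter than row 0.
def Pre_findBasins (grid : List (List Int)) : Prop :=
  ∀ row ∈ grid, (grid.headD []).length ≤ row.length
instance (grid : List (List Int)) : Decidable (Pre_findBasins grid) := by
  unfold Pre_findBasins; infer_instance

def pvWitness_findBasins : List (List Int) := [[1, 9, 2], [9, 3, 3]]

def Spec_findBasins (grid : List (List Int)) (out : List (List (Int × Int))) : Prop :=
  out = findBasins_alt grid
instance (grid : List (List Int)) (out : List (List (Int × Int))) :
    Decidable (Spec_findBasins grid out) := by unfold Spec_findBasins; infer_instance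

-- ===== CLAIM (what is proved, stated in full; the proofs are below) =====
def Claim_equal_findBasins : Prop :=
  ∀ (grid : List (List Int)), Dom_findBasins grid → Pre_findBasins grid →
    Spec_findBasins grid (findBasins grid)

-- ===== LEMMAS AND PROOFS =====

-- rows / cols as A computes them (B's `len(grid[0]) if rows else 0` agrees: len [] = 0)
def rowsOf (grid : List (List Int)) : Int := PySem.List.len grid
def colsOf (grid : List (List Int)) : Int :=
  PySem.List.len ((PySem.List.pyGet? grid 0).getD [])

def nbrs (v : Int × Int) : List (Int × Int) :=
  [(v.1, v.2 - 1), (v.1, v.2 + 1), (v.1 - 1, v.2), (v.1 + 1, v.2)]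

-- candidate cell accepted by both programs' neighbour filter
abbrev okC (grid : List (List Int)) (w : Int × Int) : Prop :=
  0 ≤ w.1 ∧ w.1 < rowsOf grid ∧ 0 ≤ w.2 ∧ w.2 < colsOf grid ∧ cellA grid w.1 w.2 ≠ 9

def updC (grid : List (List Int)) (s : PySem.Set (Int × Int)) (w : Int × Int) :
    PySem.Set (Int × Int) :=
  if okC grid w ∧ w ∉ s then s ++ [w] else s

def stepC (grid : List (List Int)) (s : PySem.Set (Int × Int)) (v : Int × Int) :
    PySem.Set (Int × Int) := (nbrs v).foldl (updC grid) s

def bfsC (grid : List (List Int)) : Nat → PySem.Set (Int × Int) → Nat → PySem.Set (Int × Int)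
  | 0, s, _ => s
  | fuel + 1, s, i => if h : i < s.length then bfsC grid fuel (stepC grid s s[i]) (i + 1) else s

def inRange (grid : List (List Int)) (v : Int × Int) : Prop :=
  0 ≤ v.1 ∧ v.1 < rowsOf grid ∧ 0 ≤ v.2 ∧ v.2 < colsOf grid

def Exp (grid : List (List Int)) (s : PySem.Set (Int × Int)) (v : Int × Int) : Prop :=
  ∀ w ∈ nbrs v, okC grid w → w ∈ s

theorem prefix_foldl_upd (grid : List (List Int)) (l : List (Int × Int))
    (s : PySem.Set (Int × Int)) : s <+: l.foldl (updC grid) s := by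
  induction l generalizing s with
  | nil => simp
  | cons w l ih =>
    refine List.IsPrefix.trans ?_ (ih (updC grid s w))
    unfold updC; split
    · exact ⟨[w], rfl⟩
    · exact List.prefix_rfl

theorem foldl_upd_eq_self_iff (grid : List (List Int)) (l : List (Int × Int))
    (s : PySem.Set (Int × Int)) :
    l.foldl (updC grid) s = s ↔ ∀ w ∈ l, okC grid w → w ∈ s := by
  induction l generalizing s with
  | nil => simp
  | cons w l ih =>
    simp only [List.foldl_cons]
    by_cases h : okC grid w ∧ w ∉ s
    · have hupd : updC grid s w = s ++ [w] := by unfold updC; simp [h]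
      rw [hupd]
      constructor
      · intro heq
        exfalso
        have hpre := prefix_foldl_upd grid l (s ++ [w])
        have hlen := hpre.length_le
        rw [heq] at hlen
        simp at hlen
      · intro hall
        exact absurd (hall w (by simp) h.1) h.2
    · have hupd : updC grid s w = s := by unfold updC; simp [h]
      rw [hupd, ih]
      constructor
      · intro hall w' hw' hok'
        rcases List.mem_cons.mp hw' with hw' | hw'
        · subst hw'
          by_contra hmem
          exact h ⟨hok', hmem⟩
        · exact hall w' hw' hok'
      · intro hall w' hw' hok'
        exact hall w' (by simp [hw']) hok'

theorem mem_foldl_upd (grid : List (List Int)) (l : List (Int × Int))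
    (s : PySem.Set (Int × Int)) (x : Int × Int) (hx : x ∈ l.foldl (updC grid) s) :
    x ∈ s ∨ (okC grid x ∧ x ∈ l) := by
  induction l generalizing s with
  | nil => simpa using hx
  | cons w l ih =>
    simp only [List.foldl_cons] at hx
    rcases ih (updC grid s w) hx with h | h
    · unfold updC at h
      split at h
      · rcases List.mem_append.mp h with h | h
        · exact Or.inl h
        · simp at h
          subst h
          rename_i hcond
          exact Or.inr ⟨hcond.1, by simp⟩
      · exact Or.inl h
    · exact Or.inr ⟨h.1, by simp [h.2]⟩

theorem expand_foldl_upd (grid : List (List Int)) (l : List (Int × Int))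
    (s : PySem.Set (Int × Int)) (w : Int × Int) (hw : w ∈ l) (hok : okC grid w) :
    w ∈ l.foldl (updC grid) s := by
  induction l generalizing s with
  | nil => simp at hw
  | cons w' l ih =>
    simp only [List.foldl_cons]
    rcases List.mem_cons.mp hw with rfl | hw
    · have : w ∈ updC grid s w := by
        unfold updC
        by_cases hmem : w ∈ s
        · split <;> simp [hmem]
        · rw [if_pos ⟨hok, hmem⟩]
          simp
      exact (prefix_foldl_upd grid l (updC grid s w)).subset this
    · exact ih (updC grid s w') hw

theorem nodup_foldl_upd (grid : List (List Int)) (l : List (Int × Int))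
    (s : PySem.Set (Int × Int)) (hs : s.Nodup) : (l.foldl (updC grid) s).Nodup := by
  induction l generalizing s with
  | nil => simpa using hs
  | cons w l ih =>
    simp only [List.foldl_cons]
    refine ih (updC grid s w) ?_
    unfold updC
    split
    · rename_i hcond
      simp only [List.nodup_append, List.nodup_cons, List.not_mem_nil,
        not_false_eq_true, List.nodup_nil, List.mem_singleton, and_true, true_and]
      refine ⟨hs, ?_⟩
      intro a ha b hb
      subst hb
      intro hab
      subst hab
      exact hcond.2 ha
    · exact hs


theorem updC_prefix (grid : List (List Int)) (s : PySem.Set (Int × Int)) (w : Int × Int) :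
    s <+: updC grid s w := by
  unfold updC; split
  · exact ⟨[w], rfl⟩
  · exact List.prefix_rfl

theorem prefix_length_lt (s t : List (Int × Int)) (h : s <+: t) (hne : t ≠ s) :
    s.length < t.length := by
  rcases Nat.lt_or_ge s.length t.length with h1 | h1
  · exact h1
  · exact absurd (List.IsPrefix.eq_of_length h (le_antisymm h.length_le h1)).symm hne

theorem flag_or (b : Bool) (s s1 s2 : List (Int × Int)) (h1 : s <+: s1) (h2 : s1 <+: s2) :
    ((b || decide (s1 ≠ s)) || decide (s2 ≠ s1)) = (b || decide (s2 ≠ s)) := by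
  by_cases e1 : s1 = s
  · subst e1; simp
  · have hlt : s.length < s1.length := prefix_length_lt s s1 h1 e1
    have hne2 : s2 ≠ s := by
      intro h
      have := h2.length_le
      rw [h] at this
      omega
    simp [e1, hne2]

theorem updC_flag (grid : List (List Int)) (s : PySem.Set (Int × Int)) (b : Bool)
    (cond : Prop) [Decidable cond] (w1 w2 : Int)
    (hc : cond ↔ (0 ≤ w1 ∧ w1 < rowsOf grid ∧ 0 ≤ w2 ∧ w2 < colsOf grid)) :
    (if cond ∧ cellA grid w1 w2 ≠ 9 ∧ ¬ PySem.Set.contains s (w1, w2) then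
      (PySem.Set.add s (w1, w2), true) else (s, b))
    = (updC grid s (w1, w2), b || decide (updC grid s (w1, w2) ≠ s)) := by
  have hcontains : (PySem.Set.contains s (w1, w2) = true) ↔ (w1, w2) ∈ s :=
    PySem.Set.contains_iff s (w1, w2)
  by_cases h : okC grid (w1, w2) ∧ (w1, w2) ∉ s
  · have hcond : cond ∧ cellA grid w1 w2 ≠ 9 ∧ ¬ PySem.Set.contains s (w1, w2) := by
      unfold okC at h
      refine ⟨hc.mpr ⟨h.1.1, h.1.2.1, h.1.2.2.1, h.1.2.2.2.1⟩, h.1.2.2.2.2, ?_⟩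
      simp only [hcontains]
      exact h.2
    have hupd : updC grid s (w1, w2) = s ++ [(w1, w2)] := by unfold updC; simp [h]
    rw [if_pos hcond, hupd, PySem.Set.add_of_not_mem h.2]
    simp
  · have hcond : ¬ (cond ∧ cellA grid w1 w2 ≠ 9 ∧ ¬ PySem.Set.contains s (w1, w2)) := by
      intro hcond
      apply h
      refine ⟨?_, ?_⟩
      · unfold okC
        have := hc.mp hcond.1
        exact ⟨this.1, this.2.1, this.2.2.1, this.2.2.2, hcond.2.1⟩
      · simp only [hcontains] at hcond
        exact hcond.2.2
    have hupd : updC grid s (w1, w2) = s := by unfold updC; simp [h]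
    rw [if_neg hcond, hupd]
    simp

theorem stepA_eq (grid : List (List Int)) (s : PySem.Set (Int × Int)) (b : Bool)
    (v : Int × Int) (hv : inRange grid v) :
    stepA grid (s, b) v = (stepC grid s v, b || decide (stepC grid s v ≠ s)) := by
  obtain ⟨ha, hb, hc, hd⟩ := hv
  simp only [stepA, stepC, nbrs, List.foldl]
  have hb' : v.1 < PySem.List.len grid := hb
  have hd' : v.2 < PySem.List.len ((PySem.List.pyGet? grid 0).getD []) := hd
  rw [updC_flag grid s b _ v.1 (v.2 - 1) (by unfold rowsOf colsOf; constructor <;> intro <;> omega)]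
  rw [updC_flag grid _ _ _ v.1 (v.2 + 1) (by unfold rowsOf colsOf; constructor <;> intro <;> omega)]
  rw [updC_flag grid _ _ _ (v.1 - 1) v.2 (by unfold rowsOf colsOf; constructor <;> intro <;> omega)]
  rw [updC_flag grid _ _ _ (v.1 + 1) v.2 (by unfold rowsOf colsOf; constructor <;> intro <;> omega)]
  set s1 := updC grid s (v.1, v.2 - 1) with hs1
  set s2 := updC grid s1 (v.1, v.2 + 1) with hs2
  set s3 := updC grid s2 (v.1 - 1, v.2) with hs3
  set s4 := updC grid s3 (v.1 + 1, v.2) with hs4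
  have p1 : s <+: s1 := updC_prefix grid s _
  have p2 : s1 <+: s2 := updC_prefix grid s1 _
  have p3 : s2 <+: s3 := updC_prefix grid s2 _
  have p4 : s3 <+: s4 := updC_prefix grid s3 _
  rw [flag_or b s s1 s2 p1 p2, flag_or b s s2 s3 (p1.trans p2) p3,
    flag_or b s s3 s4 ((p1.trans p2).trans p3) p4]
  rfl

theorem prefix_foldl_stepC (grid : List (List Int)) (l : List (Int × Int))
    (s : PySem.Set (Int × Int)) : s <+: List.foldl (stepC grid) s l := by
  induction l generalizing s with
  | nil => simp
  | cons v l ih =>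
    simp only [List.foldl_cons]
    exact (prefix_foldl_upd grid (nbrs v) s).trans (ih (stepC grid s v))

theorem passA_eq (grid : List (List Int)) (l : List (Int × Int))
    (s : PySem.Set (Int × Int)) (b : Bool) (hl : ∀ v ∈ l, inRange grid v) :
    List.foldl (stepA grid) (s, b) l =
      (List.foldl (stepC grid) s l, b || decide (List.foldl (stepC grid) s l ≠ s)) := by
  induction l generalizing s b with
  | nil => simp
  | cons v l ih =>
    simp only [List.foldl_cons]
    rw [stepA_eq grid s b v (hl v (by simp))]
    rw [ih (stepC grid s v) _ (fun w hw => hl w (by simp [hw]))]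
    rw [flag_or b s (stepC grid s v) _ (prefix_foldl_upd grid (nbrs v) s)
      (prefix_foldl_stepC grid l (stepC grid s v))]
    rfl

theorem foldl_stepC_of_expanded (grid : List (List Int)) (l : List (Int × Int))
    (s : PySem.Set (Int × Int)) (h : ∀ v ∈ l, Exp grid s v) :
    List.foldl (stepC grid) s l = s := by
  induction l generalizing s with
  | nil => simp
  | cons v l ih =>
    simp only [List.foldl_cons]
    have hfix : stepC grid s v = s :=
      (foldl_upd_eq_self_iff grid (nbrs v) s).mpr (h v (by simp))
    rw [hfix]
    exact ih s (fun w hw => h w (by simp [hw]))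

theorem foldl_stepC_expands (grid : List (List Int)) (l : List (Int × Int))
    (s : PySem.Set (Int × Int)) (v : Int × Int) (hv : v ∈ l) :
    Exp grid (List.foldl (stepC grid) s l) v := by
  induction l generalizing s with
  | nil => simp at hv
  | cons v' l ih =>
    simp only [List.foldl_cons]
    rcases List.mem_cons.mp hv with rfl | hv
    · intro w hw hok
      exact (prefix_foldl_stepC grid l (stepC grid s v)).subset
        (expand_foldl_upd grid (nbrs v) s w hw hok)
    · exact ih (stepC grid s v') hv


theorem prefix_getElem? (s t : List (Int × Int)) (h : s <+: t) (k : Nat)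
    (hk : k < s.length) : t[k]? = s[k]? := by
  obtain ⟨u, rfl⟩ := h
  simp [List.getElem?_append, hk]

theorem nodup_foldl_stepC (grid : List (List Int)) (l : List (Int × Int))
    (s : PySem.Set (Int × Int)) (hs : s.Nodup) : (List.foldl (stepC grid) s l).Nodup := by
  induction l generalizing s with
  | nil => simpa using hs
  | cons v l ih => exact ih (stepC grid s v) (nodup_foldl_upd grid (nbrs v) s hs)

theorem range_foldl_stepC (grid : List (List Int)) (l : List (Int × Int))
    (s : PySem.Set (Int × Int)) (hs : ∀ v ∈ s, inRange grid v) :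
    ∀ x ∈ List.foldl (stepC grid) s l, inRange grid x := by
  induction l generalizing s with
  | nil => simpa using hs
  | cons v l ih =>
    refine ih (stepC grid s v) ?_
    intro x hx
    rcases mem_foldl_upd grid (nbrs v) s x hx with h | h
    · exact hs x h
    · exact ⟨h.1.1, h.1.2.1, h.1.2.2.1, h.1.2.2.2.1⟩

theorem bfsC_succ (grid : List (List Int)) (fuel : Nat) (s : PySem.Set (Int × Int))
    (i : Nat) : bfsC grid (fuel + 1) s i =
      if h : i < s.length then bfsC grid fuel (stepC grid s s[i]) (i + 1) else s := rfl

theorem bfsC_stop (grid : List (List Int)) (fuel : Nat) (s : PySem.Set (Int × Int))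
    (i : Nat) (h : s.length ≤ i) : bfsC grid fuel s i = s := by
  cases fuel with
  | zero => rfl
  | succ f =>
    unfold bfsC
    rw [dif_neg (by omega)]

theorem bfsC_seg (grid : List (List Int)) (l : List (Int × Int)) :
    ∀ (s : PySem.Set (Int × Int)) (i fuel : Nat),
    (∀ k, (hk : k < l.length) → s[i + k]? = l[k]?) → i + l.length ≤ s.length →
    l.length ≤ fuel →
    bfsC grid fuel s i = bfsC grid (fuel - l.length) (List.foldl (stepC grid) s l)
      (i + l.length) := by
  induction l with
  | nil => intro s i fuel _ _ _; simp
  | cons v l ih =>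
    intro s i fuel hget hlen hfuel
    simp only [List.length_cons] at hlen hfuel
    cases fuel with
    | zero => omega
    | succ f =>
      have hi : i < s.length := by omega
      have hv : s[i]? = some v := by simpa using hget 0 (by simp)
      have hsv : s[i] = v := by
        have := List.getElem?_eq_getElem hi
        rw [this] at hv
        exact Option.some.inj hv
      rw [bfsC_succ, dif_pos hi, hsv]
      have hpre : s <+: stepC grid s v := prefix_foldl_upd grid (nbrs v) s
      have hres := ih (stepC grid s v) (i + 1) f
        (by
          intro k hk
          have h1 := hget (k + 1) (by simp; omega)
          rw [prefix_getElem? s (stepC grid s v) hpre (i + 1 + k) (by omega)]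
          rw [show i + 1 + k = i + (k + 1) from by omega]
          simpa using h1)
        (by have := hpre.length_le; omega)
        (by omega)
      rw [show i + (v :: l).length = i + 1 + l.length from by simp; omega]
      simp only [List.length_cons, List.foldl_cons]
      rw [show f + 1 - (l.length + 1) = f - l.length from by omega]
      exact hres

theorem length_le_bound (grid : List (List Int)) (s : PySem.Set (Int × Int))
    (hnd : s.Nodup) (hr : ∀ v ∈ s, inRange grid v) :
    s.length ≤ grid.length * ((PySem.List.pyGet? grid 0).getD []).length := by
  classical
  have hsub : s.toFinset ⊆
      (Finset.Ico (0 : Int) (rowsOf grid)) ×ˢ (Finset.Ico (0 : Int) (colsOf grid)) := by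
    intro x hx
    have h := hr x (List.mem_toFinset.mp hx)
    simp only [Finset.mem_product, Finset.mem_Ico]
    exact ⟨⟨h.1, h.2.1⟩, ⟨h.2.2.1, h.2.2.2⟩⟩
  have hcard := Finset.card_le_card hsub
  rw [Finset.card_product] at hcard
  rw [List.toFinset_card_of_nodup hnd] at hcard
  have hrc : (Finset.Ico (0 : Int) (rowsOf grid)).card = grid.length := by
    rw [Int.card_Ico]
    simp [rowsOf]
  have hcc : (Finset.Ico (0 : Int) (colsOf grid)).card =
      ((PySem.List.pyGet? grid 0).getD []).length := by
    rw [Int.card_Ico]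
    simp [colsOf]
  rw [hrc, hcc] at hcard
  exact hcard

theorem loopA_succ (grid : List (List Int)) (fuel : Nat) (s : PySem.Set (Int × Int)) :
    loopA grid (fuel + 1) s =
      (if (List.foldl (stepA grid) (s, false) s).2 then
        loopA grid fuel (List.foldl (stepA grid) (s, false) s).1
      else (List.foldl (stepA grid) (s, false) s).1) := rfl

theorem loopA_eq_bfsC (grid : List (List Int)) :
    ∀ (fuelA : Nat) (fuelB : Nat) (s : PySem.Set (Int × Int)) (i : Nat),
    s.Nodup → (∀ v ∈ s, inRange grid v) → i ≤ s.length →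
    (∀ v ∈ s.take i, Exp grid s v) →
    grid.length * ((PySem.List.pyGet? grid 0).getD []).length + 1 - s.length ≤ fuelA →
    grid.length * ((PySem.List.pyGet? grid 0).getD []).length - i ≤ fuelB →
    s.length ≤ grid.length * ((PySem.List.pyGet? grid 0).getD []).length →
    loopA grid fuelA s = bfsC grid fuelB s i := by
  intro fuelA
  induction fuelA with
  | zero =>
    intro fuelB s i hnd hr hi hexp hfA hfB hbound
    omega
  | succ f ih =>
    intro fuelB s i hnd hr hi hexp hfA hfB hbound
    have hpass := passA_eq grid s s false hr
    have hpreS : s <+: List.foldl (stepC grid) s s := prefix_foldl_stepC grid s s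
    have hsplit : List.foldl (stepC grid) s s = List.foldl (stepC grid) s (s.drop i) := by
      nth_rewrite 2 [show s = s.take i ++ s.drop i from (List.take_append_drop i s).symm]
      rw [List.foldl_append, foldl_stepC_of_expanded grid (s.take i) s hexp]
    have hseg := bfsC_seg grid (s.drop i) s i fuelB
      (fun k hk => (List.getElem?_drop).symm)
      (by simp only [List.length_drop]; omega)
      (by simp only [List.length_drop]; omega)
    rw [List.length_drop, show i + (s.length - i) = s.length from by omega] at hseg
    rw [loopA_succ, hpass]
    by_cases hchg : List.foldl (stepC grid) s s = s
    · simp only [hchg, ne_eq, not_true_eq_false, decide_false, Bool.or_false, Bool.false_eq_true,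
        if_false]
      rw [hseg, ← hsplit, hchg, bfsC_stop grid _ s s.length (le_refl _)]
    · simp only [ne_eq, hchg, not_false_eq_true, decide_true, Bool.or_true, if_true]
      set S' := List.foldl (stepC grid) s s with hS'
      have hnd' : S'.Nodup := nodup_foldl_stepC grid s s hnd
      have hr' : ∀ v ∈ S', inRange grid v := range_foldl_stepC grid s s hr
      have hlt : s.length < S'.length := prefix_length_lt s S' hpreS hchg
      have hbound' : S'.length ≤ grid.length * ((PySem.List.pyGet? grid 0).getD []).length :=
        length_le_bound grid S' hnd' hr'
      have htake : S'.take s.length = s := by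
        obtain ⟨u, hu⟩ := hpreS
        rw [← hu, List.take_left]
      have hexp' : ∀ v ∈ S'.take s.length, Exp grid S' v := by
        intro v hv
        rw [htake] at hv
        rcases List.mem_append.mp (by rw [List.take_append_drop i s]; exact hv :
            v ∈ s.take i ++ s.drop i) with hv' | hv'
        · intro w hw hok
          exact hpreS.subset (hexp v hv' w hw hok)
        · rw [hsplit]
          exact foldl_stepC_expands grid (s.drop i) s v hv'
      rw [hseg, ← hsplit]
      exact ih (fuelB - (s.length - i)) S' s.length hnd' hr' (by omega) hexp'
        (by omega) (by omega) hbound'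

theorem stepB_sync (grid : List (List Int)) (l : List (Int × Int))
    (s : PySem.Set (Int × Int)) :
    l.foldl (stepB grid (rowsOf grid) (colsOf grid)) (s, s) =
      (l.foldl (updC grid) s, l.foldl (updC grid) s) := by
  induction l generalizing s with
  | nil => simp
  | cons w l ih =>
    simp only [List.foldl_cons]
    have hstep : stepB grid (rowsOf grid) (colsOf grid) (s, s) w = (updC grid s w, updC grid s w) := by
      unfold stepB updC okC
      have hcontains : (PySem.Set.contains s w = true) ↔ w ∈ s := PySem.Set.contains_iff s w
      by_cases h : (0 ≤ w.1 ∧ w.1 < rowsOf grid ∧ 0 ≤ w.2 ∧ w.2 < colsOf grid ∧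
          cellA grid w.1 w.2 ≠ 9) ∧ w ∉ s
      · rw [if_pos ⟨h.1.1, h.1.2.1, h.1.2.2.1, h.1.2.2.2.1, h.1.2.2.2.2, by
          simp only [hcontains]; exact h.2⟩, if_pos h]
        rw [PySem.Set.add_of_not_mem h.2]
      · rw [if_neg (by
          intro hcond
          simp only [hcontains] at hcond
          exact h ⟨⟨hcond.1, hcond.2.1, hcond.2.2.1, hcond.2.2.2.1, hcond.2.2.2.2.1⟩,
            hcond.2.2.2.2.2⟩), if_neg h]
    rw [hstep]
    exact ih (updC grid s w)

theorem bfsB_succ (grid : List (List Int)) (rows cols : Int) (fuel : Nat)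
    (seen : PySem.Set (Int × Int)) (queue : List (Int × Int)) (i : Nat) :
    bfsB grid rows cols (fuel + 1) seen queue i =
      if h : i < queue.length then
        bfsB grid rows cols fuel
          (([(queue[i].1, queue[i].2 - 1), (queue[i].1, queue[i].2 + 1),
            (queue[i].1 - 1, queue[i].2), (queue[i].1 + 1, queue[i].2)].foldl
            (stepB grid rows cols) (seen, queue))).1
          (([(queue[i].1, queue[i].2 - 1), (queue[i].1, queue[i].2 + 1),
            (queue[i].1 - 1, queue[i].2), (queue[i].1 + 1, queue[i].2)].foldl
            (stepB grid rows cols) (seen, queue))).2 (i + 1)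
      else (seen, queue) := rfl

theorem bfsB_eq_bfsC (grid : List (List Int)) :
    ∀ (fuel : Nat) (s : PySem.Set (Int × Int)) (i : Nat),
    bfsB grid (rowsOf grid) (colsOf grid) fuel s s i = (bfsC grid fuel s i, bfsC grid fuel s i) := by
  intro fuel
  induction fuel with
  | zero => intro s i; rfl
  | succ f ih =>
    intro s i
    rw [bfsB_succ, bfsC_succ]
    by_cases h : i < s.length
    · rw [dif_pos h, dif_pos h]
      have hsync := stepB_sync grid
        [(s[i].1, s[i].2 - 1), (s[i].1, s[i].2 + 1), (s[i].1 - 1, s[i].2), (s[i].1 + 1, s[i].2)] s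
      rw [hsync]
      exact ih (stepC grid s s[i]) (i + 1)
    · rw [dif_neg h, dif_neg h]

-- relation carried through the row/column scan: same basins so far, and the global
-- visited set of B holds exactly the members of the basins found so far
def RelAB (a : List (List (Int × Int)))
    (b : PySem.Set (Int × Int) × List (List (Int × Int))) : Prop :=
  a = b.2 ∧ ∀ p : Int × Int, (∃ x ∈ b.2, p ∈ x) ↔ p ∈ b.1

theorem foldl_rel {α β γ : Type} (R : α → β → Prop) (f : α → γ → α) (g : β → γ → β)
    (l : List γ) : ∀ (a : α) (b : β), R a b →
    (∀ x ∈ l, ∀ (a : α) (b : β), R a b → R (f a x) (g b x)) →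
    R (l.foldl f a) (l.foldl g b) := by
  induction l with
  | nil => intro a b h _; exact h
  | cons x l ih =>
    intro a b h hstep
    exact ih _ _ (hstep x (by simp) a b h) (fun y hy => hstep y (by simp [hy]))

-- ===== VERDICT (by name: the statement is the Claim_ definition above) =====
theorem findBasins_spec : Claim_equal_findBasins := by
  unfold Claim_equal_findBasins Spec_findBasins
  intro grid _ _
  by_cases hg : grid = []
  · subst hg; rfl
  · unfold findBasins findBasins_alt
    have hrows0 : PySem.List.len grid ≠ 0 := by
      simp [PySem.List.len_eq, hg]
    simp only [ne_eq, hrows0, not_false_eq_true, if_pos]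
    refine (foldl_rel RelAB _ _ _ [] (PySem.Set.empty, ([] : List (List (Int × Int))))
      ⟨rfl, by simp [PySem.Set.empty]⟩ ?_).1
    intro r hrmem a b hab
    refine foldl_rel RelAB _ _ _ a b hab ?_
    intro c hcmem a' b' hab'
    have hr := (PySem.List.mem_pyRange_one).mp hrmem
    have hc := (PySem.List.mem_pyRange_one).mp hcmem
    have hcond : ((a'.any fun x => PySem.Set.contains x (r, c)) = true ∨ cellA grid r c = 9) ↔
        (PySem.Set.contains b'.1 (r, c) = true ∨ cellA grid r c = 9) := by
      have h1 : (a'.any fun x => PySem.Set.contains x (r, c)) = true ↔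
          (∃ x ∈ b'.2, (r, c) ∈ x) := by
        rw [hab'.1, List.any_eq_true]
        constructor
        · rintro ⟨x, hx, hmem⟩
          exact ⟨x, hx, (PySem.Set.contains_iff x (r, c)).mp hmem⟩
        · rintro ⟨x, hx, hmem⟩
          exact ⟨x, hx, (PySem.Set.contains_iff x (r, c)).mpr hmem⟩
      rw [h1, hab'.2 (r, c), PySem.Set.contains_iff]
    by_cases hskip : PySem.Set.contains b'.1 (r, c) = true ∨ cellA grid r c = 9
    · rw [if_pos (hcond.mpr hskip), if_pos hskip]
      exact hab'
    · rw [if_neg (fun h => hskip (hcond.mp h)), if_neg hskip]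
      have hlen1 : 1 ≤ grid.length * ((PySem.List.pyGet? grid 0).getD []).length := by
        have h1 : (0:Int) < PySem.List.len grid := by omega
        have h2 : (0:Int) < PySem.List.len ((PySem.List.pyGet? grid 0).getD []) := by omega
        rw [PySem.List.len_eq] at h1 h2
        exact Nat.mul_pos (Int.natCast_pos.mp h1) (Int.natCast_pos.mp h2)
      have hbasin : loopA grid (grid.length * ((PySem.List.pyGet? grid 0).getD []).length + 1)
          (PySem.Set.empty.add (r, c)) =
          (bfsB grid (PySem.List.len grid)
            (PySem.List.len ((PySem.List.pyGet? grid 0).getD []))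
            ((PySem.List.len grid).toNat *
              (PySem.List.len ((PySem.List.pyGet? grid 0).getD [])).toNat + 1)
            (PySem.Set.ofList [(r, c)]) [(r, c)] 0).1 := by
        have hfuel : (PySem.List.len grid).toNat *
            (PySem.List.len ((PySem.List.pyGet? grid 0).getD [])).toNat + 1 =
            grid.length * ((PySem.List.pyGet? grid 0).getD []).length + 1 := by
          simp [PySem.List.len_eq]
        have hB := bfsB_eq_bfsC grid
          (grid.length * ((PySem.List.pyGet? grid 0).getD []).length + 1) [(r, c)] 0
        unfold rowsOf colsOf at hB
        rw [hfuel]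
        rw [show PySem.Set.ofList [(r, c)] = [(r, c)] from rfl,
          show PySem.Set.empty.add (r, c) = [(r, c)] from rfl]
        rw [hB]
        refine loopA_eq_bfsC grid _ _ [(r, c)] 0 (by simp) ?_ (by simp) (by simp)
          (by simp) (by omega) (by simpa using hlen1)
        intro v hv
        simp only [List.mem_singleton] at hv
        subst hv
        unfold inRange rowsOf colsOf
        exact ⟨hr.1, hr.2, hc.1, hc.2⟩
      constructor
      · simp only [hab'.1, hbasin]
      · intro p
        simp only [List.mem_append, List.mem_singleton]
        rw [PySem.Set.mem_union]
        constructor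
        · rintro ⟨x, hx | hx, hmem⟩
          · exact Or.inl ((hab'.2 p).mp ⟨x, hx, hmem⟩)
          · subst hx
            rw [← hbasin] at hmem
            exact Or.inr (by rw [hbasin] at hmem; exact hmem)
        · rintro (hmem | hmem)
          · obtain ⟨x, hx, hm⟩ := (hab'.2 p).mpr hmem
            exact ⟨x, Or.inl hx, hm⟩
          · exact ⟨_, Or.inr rfl, hmem⟩
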